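-- pv_equiv track=rewrite | github.com/crimair/atcoder | abc087/d.py | people_check
-- ===== SOURCE A (Python) =====
-- def people_check(N, infol):
--     info = [0] * (N + 1)
--     check = [False] * (N + 1)
--     for l0 in range(1, N + 1):
--         recheck = []
--         if check[l0] == False:
--             recheck.append(l0)
--             check[l0] = True
--             info[l0] = 0
--
--             while len(recheck) > 0:
--                 sel = recheck.pop()
--                 for p, d in infol[sel]:
--                     if check[p] == False:
--                         check[p] = True
--                         info[p] = d + info[sel]
--                         recheck.append(p)
--                     else:
--                         temp = d + info[sel]
--                         if info[p] != temp:
--                             return False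
--
--     return True
-- ===== SOURCE B (Python) =====
-- def people_check(N, infol):
--     # Phase 1: pure DFS labelling -- assign each node a potential, no checking.
--     pot = {}
--     for start in range(1, N + 1):
--         if start not in pot:
--             pot[start] = 0
--             stack = [start]
--             while stack:
--                 u = stack.pop()
--                 for v, d in infol[u]:
--                     if v not in pot:
--                         pot[v] = pot[u] + d
--                         stack.append(v)
--     # Phase 2: one global verification pass over every constraint.
--     return all(pot[v] == pot[u] + d
--                for u in range(1, N + 1)
--                for v, d in infol[u])
-- ===== Notes on version B (the rewrite author's own statement) =====
-- stated objective: idiomatic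
-- what changed: B replaces A's fused traversal (parallel info/check arrays with inline consistency checks and an early return) by two separate phases: a pure DFS labelling into a potential dictionary, then one global all(...) verification pass over every constraint.
-- outside the precondition, e.g. on people_check(1, {1: [(-1, 5)]}): A returns False, B raises KeyError; on people_check(2, {1: [(1, 1)]}): A returns False, B raises KeyError
import Mathlib
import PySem

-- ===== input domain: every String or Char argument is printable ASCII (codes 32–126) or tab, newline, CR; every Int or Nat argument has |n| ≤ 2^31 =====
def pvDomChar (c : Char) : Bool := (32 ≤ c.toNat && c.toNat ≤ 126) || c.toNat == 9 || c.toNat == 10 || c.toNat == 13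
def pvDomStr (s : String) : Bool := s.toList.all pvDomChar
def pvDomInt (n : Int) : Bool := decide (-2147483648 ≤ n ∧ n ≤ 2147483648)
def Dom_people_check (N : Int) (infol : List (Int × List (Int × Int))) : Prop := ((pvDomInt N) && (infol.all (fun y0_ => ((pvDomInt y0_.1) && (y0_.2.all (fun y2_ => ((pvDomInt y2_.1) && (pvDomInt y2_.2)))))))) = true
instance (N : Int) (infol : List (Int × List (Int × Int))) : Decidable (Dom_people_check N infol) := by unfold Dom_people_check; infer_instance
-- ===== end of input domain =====

-- B separates A's fused DFS (inline consistency checks, early return, info/check arrays)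
-- into a pure DFS labelling phase over a potential dictionary followed by one global
-- verification pass over all constraints (objective: idiomatic; equal per-input verdict).

-- ===== PORT A =====
-- A raises KeyError (missing node key) / IndexError (node id out of the array range) on
-- some inputs; those paths surface as `none` below and the top level maps them to `false`.
-- Pre_people_check excludes exactly such inputs.

-- the inner `for p, d in infol[sel]` loop of A; `some none` = Python's `return False`,
-- `none` = IndexError on `check[p]`.
def pcEdgesA (sel : Int) (es : List (Int × Int)) (info : List Int) (check : List Bool)
    (stack : List Int) : Option (Option (List Int × List Bool × List Int)) :=
  match es with
  | [] => some (some (info, check, stack))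
  | (p, d) :: rest =>
    match PySem.List.pyGet? check p with
    | none => none
    | some cp =>
      if cp = false then
        pcEdgesA sel rest (PySem.List.pySetD info p (d + PySem.List.pyGetD info sel 0))
          (PySem.List.pySetD check p true) (p :: stack)
      else
        if PySem.List.pyGetD info p 0 ≠ d + PySem.List.pyGetD info sel 0 then some none
        else pcEdgesA sel rest info check stack

-- termination measure for A's while loop
def pcMeasA (check : List Bool) (stack : List Int) : Nat :=
  2 * check.count false + stack.length

-- count of `false` entries drops by one when a `false` slot is overwritten with `true`
theorem pcCountFalseSet (l : List Bool) (k : Nat) (h : l[k]? = some false) :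
    (l.set k true).count false + 1 = l.count false := by
  induction l generalizing k with
  | nil => simp at h
  | cons b t ih =>
    cases k with
    | zero => simp_all
    | succ k => simp_all [List.count_cons]; cases b <;> simp_all

theorem pcSetDFalse (check : List Bool) (p : Int) (h : PySem.List.pyGet? check p = some false) :
    (PySem.List.pySetD check p true).count false + 1 = check.count false := by
  cases hk : PySem.List.pyIdx? check.length p with
  | none => simp [PySem.List.pyGet?, hk] at h
  | some k =>
    have hk2 : check[k]? = some false := by simpa [PySem.List.pyGet?, hk] using h
    simp only [PySem.List.pySetD, PySem.List.pySet?, hk, Option.map_some, Option.getD_some]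
    exact pcCountFalseSet check k hk2

theorem pcEdgesA_meas (sel : Int) (es : List (Int × Int)) :
    ∀ info check stack info' check' stack',
    pcEdgesA sel es info check stack = some (some (info', check', stack')) →
    pcMeasA check' stack' ≤ pcMeasA check stack := by
  induction es with
  | nil => intro info check stack i' c' s' h; simp [pcEdgesA] at h; simp [h.2.1, h.2.2]
  | cons pd rest ih =>
    intro info check stack i' c' s' h
    obtain ⟨p, d⟩ := pd
    simp only [pcEdgesA] at h
    cases hg : PySem.List.pyGet? check p with
    | none => simp [hg] at h
    | some cp =>
      simp only [hg] at h
      by_cases hc : cp = false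
      · simp only [hc] at h
        have := ih _ _ _ _ _ _ h
        have hcount := pcSetDFalse check p (hc ▸ hg)
        simp [pcMeasA] at this ⊢
        omega
      · simp only [if_neg hc] at h
        by_cases hne : PySem.List.pyGetD info p 0 ≠ d + PySem.List.pyGetD info sel 0
        · simp [hne] at h
        · simp only [if_neg hne] at h
          exact ih _ _ _ _ _ _ h

-- the `while len(recheck) > 0` loop of A; `some none` = `return False`, `none` = a raise
def pcInnerA (infol : List (Int × List (Int × Int))) (info : List Int) (check : List Bool)
    (stack : List Int) : Option (Option (List Int × List Bool)) :=
  match stack with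
  | [] => some (some (info, check))
  | sel :: rest =>
    match (PySem.Dict.mk infol).get? sel with
    | none => none
    | some es =>
      match h₂ : pcEdgesA sel es info check rest with
      | none => none
      | some none => some none
      | some (some (info', check', st')) => pcInnerA infol info' check' st'
termination_by pcMeasA check stack
decreasing_by
  have := pcEdgesA_meas sel es info check rest info' check' st' h₂
  simp [pcMeasA] at this ⊢
  omega

-- the outer `for l0 in range(1, N + 1)` loop of A
def pcOuterA (infol : List (Int × List (Int × Int))) (l0s : List Int) (info : List Int)
    (check : List Bool) : Option Bool :=
  match l0s with
  | [] => some true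
  | l0 :: rest =>
    if PySem.List.pyGetD check l0 false = false then
      match pcInnerA infol (PySem.List.pySetD info l0 0) (PySem.List.pySetD check l0 true) [l0] with
      | none => none
      | some none => some false
      | some (some (info', check')) => pcOuterA infol rest info' check'
    else pcOuterA infol rest info check

def people_check (N : Int) (infol : List (Int × List (Int × Int))) : Bool :=
  (pcOuterA infol (PySem.List.pyRange 1 (N + 1) 1)
    (List.replicate (N + 1).toNat 0) (List.replicate (N + 1).toNat false)).getD false

-- ===== PORT B =====
-- port of Source B; `none` = Python B raises KeyError (only outside Pre_people_check).

-- the `for v, d in infol[u]` loop of B's labelling phase (`pot[u]` is present whenever u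
-- was pushed, so `pot.getD u 0` is exact)
def pcEdgesB (u : Int) (pot : PySem.Dict Int Int) (stack : List Int) (es : List (Int × Int)) :
    PySem.Dict Int Int × List Int :=
  match es with
  | [] => (pot, stack)
  | (v, d) :: rest =>
    if pot.contains v = false then
      pcEdgesB u (pot.insert v (pot.getD u 0 + d)) (v :: stack) rest
    else pcEdgesB u pot stack rest

-- Lean-side termination measure helpers (not part of Source B's algorithm)
def pcTargets (infol : List (Int × List (Int × Int))) : List Int :=
  infol.flatMap (fun p => p.2.map Prod.fst)

def pcMeasB (infol : List (Int × List (Int × Int))) (pot : PySem.Dict Int Int)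
    (stack : List Int) : Nat :=
  2 * ((pcTargets infol).filter (fun v => !pot.contains v)).length + stack.length

theorem pcFilterMono (T : List Int) (p q : Int → Bool) (h : ∀ x, q x = true → p x = true) :
    (T.filter q).length ≤ (T.filter p).length := by
  induction T with
  | nil => simp
  | cons a t ih =>
    by_cases hq : q a = true
    · simp [hq, h a hq]; omega
    · simp only [List.filter_cons]
      cases hp : p a <;> simp_all
      omega

theorem pcFilterInsertLt (T : List Int) (pot : PySem.Dict Int Int) (v : Int) (w : Int)
    (hv : v ∈ T) (hc : pot.contains v = false) :
    (T.filter fun x => !(pot.insert v w).contains x).length <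
      (T.filter fun x => !pot.contains x).length := by
  induction T with
  | nil => simp at hv
  | cons a t ih =>
    have hmono : ∀ x : Int, (!(pot.insert v w).contains x) = true → (!pot.contains x) = true := by
      intro x hx
      simp only [Bool.not_eq_true', PySem.Dict.contains_insert] at hx ⊢
      rcases Bool.or_eq_false_iff.mp hx with ⟨_, h2⟩
      exact h2
    rcases List.mem_cons.mp hv with rfl | hvt
    · have h1 : (!(pot.insert v w).contains v) = false := by
        simp [PySem.Dict.contains_insert_self]
      have h2 : (!pot.contains v) = true := by simp [hc]
      simp only [List.filter_cons, h1, h2, Bool.false_eq_true, if_false, if_true,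
        List.length_cons]
      have := pcFilterMono t _ _ hmono
      omega
    · by_cases ha : (!(pot.insert v w).contains a) = true
      · simp only [List.filter_cons, ha, if_pos rfl, hmono a ha]
        simpa using ih hvt
      · have ha' : (!(pot.insert v w).contains a) = false := eq_false_of_ne_true ha
        simp only [List.filter_cons, ha', Bool.false_eq_true, if_false]
        have h2 := ih hvt
        cases hp : (!pot.contains a) <;> simp [hp] <;> omega

theorem pcMemTargets (infol : List (Int × List (Int × Int))) (u : Int)
    (es : List (Int × Int)) (h : (PySem.Dict.mk infol).get? u = some es) :
    ∀ vd ∈ es, vd.1 ∈ pcTargets infol := by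
  intro vd hvd
  simp only [PySem.Dict.get?, Option.map_eq_some_iff] at h
  obtain ⟨⟨u', es'⟩, hfind, hes⟩ := h
  have hmem : (u', es') ∈ infol := List.mem_of_find?_eq_some hfind
  subst hes
  simp only [pcTargets, List.mem_flatMap]
  exact ⟨(u', es'), hmem, List.mem_map_of_mem hvd⟩

theorem pcEdgesB_meas (infol : List (Int × List (Int × Int))) (u : Int) :
    ∀ (es : List (Int × Int)) pot stack,
    (∀ vd ∈ es, vd.1 ∈ pcTargets infol) →
    pcMeasB infol (pcEdgesB u pot stack es).1 (pcEdgesB u pot stack es).2 ≤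
      pcMeasB infol pot stack := by
  intro es
  induction es with
  | nil => intro pot stack _; simp [pcEdgesB]
  | cons vd rest ih =>
    intro pot stack hT
    obtain ⟨v, d⟩ := vd
    by_cases hc : pot.contains v = false
    · have hdrop := pcFilterInsertLt (pcTargets infol) pot v (pot.getD u 0 + d)
        (hT (v, d) (List.mem_cons_self)) hc
      have := ih (pot.insert v (pot.getD u 0 + d)) (v :: stack)
        (fun x hx => hT x (List.mem_cons_of_mem _ hx))
      simp only [pcEdgesB, hc, if_pos rfl]
      simp [pcMeasB] at this ⊢
      omega
    · simp only [pcEdgesB, if_neg hc]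
      exact ih pot stack (fun x hx => hT x (List.mem_cons_of_mem _ hx))

-- the `while stack:` loop of B's labelling phase
def pcInnerB (infol : List (Int × List (Int × Int))) (pot : PySem.Dict Int Int)
    (stack : List Int) : Option (PySem.Dict Int Int) :=
  match stack with
  | [] => some pot
  | u :: rest =>
    match h₁ : (PySem.Dict.mk infol).get? u with
    | none => none
    | some es => pcInnerB infol (pcEdgesB u pot rest es).1 (pcEdgesB u pot rest es).2
termination_by pcMeasB infol pot stack
decreasing_by
  have := pcEdgesB_meas infol u es pot rest (pcMemTargets infol u es h₁)
  simp [pcMeasB] at this ⊢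
  omega

-- the `for start in range(1, N + 1)` loop of B's labelling phase
def pcPhase1 (infol : List (Int × List (Int × Int))) (l0s : List Int)
    (pot : PySem.Dict Int Int) : Option (PySem.Dict Int Int) :=
  match l0s with
  | [] => some pot
  | s :: rest =>
    if pot.contains s = false then
      match pcInnerB infol (pot.insert s 0) [s] with
      | none => none
      | some pot' => pcPhase1 infol rest pot'
    else pcPhase1 infol rest pot

def people_check_alt (N : Int) (infol : List (Int × List (Int × Int))) : Bool :=
  match pcPhase1 infol (PySem.List.pyRange 1 (N + 1) 1) PySem.Dict.empty with
  | none => false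
  | some pot =>
    (PySem.List.pyRange 1 (N + 1) 1).all fun u =>
      (((PySem.Dict.mk infol).get? u).getD []).all fun vd =>
        pot.getD vd.1 0 == pot.getD u 0 + vd.2

-- ===== PRECONDITION & SPEC =====
-- Pre_people_check restricts to the task's natural domain (AtCoder ABC087 D: people are
-- numbered 1..N): every node 1..N has an entry in infol and every constraint target lies
-- in 1..N.  Outside it A raises KeyError/IndexError on the inputs it actually touches;
-- A can also return False early (before touching a missing key or via Python's
-- negative-index wraparound on check/info) — such returns are artefacts of A's traversal
-- order and are excluded with the rest of the out-of-domain inputs (see claim cites).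
-- (stated via the distinct keys of infol lying in 1..N, so that it is cheaply decidable
-- even for huge N: the first conjunct says, by counting, that every node 1..N has an entry)
def Pre_people_check (N : Int) (infol : List (Int × List (Int × Int))) : Prop :=
  N.toNat ≤ ((infol.map Prod.fst).dedup.filter
      (fun k => decide (1 ≤ k) && decide (k ≤ N))).length ∧
  ∀ u ∈ (infol.map Prod.fst).dedup.filter (fun k => decide (1 ≤ k) && decide (k ≤ N)),
    ∀ vd ∈ ((PySem.Dict.mk infol).get? u).getD [], 1 ≤ vd.1 ∧ vd.1 ≤ N

instance (N : Int) (infol : List (Int × List (Int × Int))) :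
    Decidable (Pre_people_check N infol) := by unfold Pre_people_check; infer_instance

def pvWitness_people_check : Int × (List (Int × List (Int × Int))) :=
  (2, [(1, [(2, 3)]), (2, [(1, -3)])])

def Spec_people_check (N : Int) (infol : List (Int × List (Int × Int))) (out : Bool) : Prop :=
  out = people_check_alt N infol
instance (N : Int) (infol : List (Int × List (Int × Int))) (out : Bool) :
    Decidable (Spec_people_check N infol out) := by unfold Spec_people_check; infer_instance

-- ===== CLAIM (what is proved, stated in full; the proofs are below) =====
def Claim_equal_people_check : Prop :=
  ∀ (N : Int) (infol : List (Int × List (Int × Int))), Dom_people_check N infol →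
    Pre_people_check N infol → Spec_people_check N infol (people_check N infol)

-- ===== LEMMAS AND PROOFS =====

-- proof-side helpers (used only by the proofs below)

-- the (first-match) constraint list of node u
def pcLook (infol : List (Int × List (Int × Int))) (u : Int) : List (Int × Int) :=
  ((PySem.Dict.mk infol).get? u).getD []

-- all constraints of the nodes in S hold under the potential table pot
def pcGood (infol : List (Int × List (Int × Int))) (pot : PySem.Dict Int Int)
    (S : List Int) : Prop :=
  ∀ u ∈ S, ∀ vd ∈ pcLook infol u, pot.getD vd.1 0 = pot.getD u 0 + vd.2

-- A's (info, check) arrays represent exactly B's potential dictionary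
def pcInv (N : Int) (pot : PySem.Dict Int Int) (info : List Int) (check : List Bool) : Prop :=
  info.length = (N + 1).toNat ∧ check.length = (N + 1).toNat ∧
  ∀ v : Int, 1 ≤ v → v ≤ N →
    PySem.List.pyGetD check v false = pot.contains v ∧
    (pot.contains v = true → PySem.List.pyGetD info v 0 = pot.getD v 0)

def pcKeysIn (N : Int) (pot : PySem.Dict Int Int) : Prop :=
  ∀ k : Int, pot.contains k = true → 1 ≤ k ∧ k ≤ N

-- pot' extends pot without changing existing entries
def pcSub (pot pot' : PySem.Dict Int Int) : Prop :=
  ∀ k, pot.contains k = true → pot'.get? k = pot.get? k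

theorem pcSub_refl (pot : PySem.Dict Int Int) : pcSub pot pot := fun _ _ => rfl

theorem pcSub_contains {pot pot' : PySem.Dict Int Int} (h : pcSub pot pot') (k : Int)
    (hk : pot.contains k = true) : pot'.contains k = true := by
  rw [PySem.Dict.contains_eq_isSome_get?, h k hk, ← PySem.Dict.contains_eq_isSome_get?]
  exact hk

theorem pcSub_trans {a b c : PySem.Dict Int Int} (hab : pcSub a b) (hbc : pcSub b c) :
    pcSub a c := by
  intro k hk
  rw [hbc k (pcSub_contains hab k hk), hab k hk]

theorem pcSub_getD {pot pot' : PySem.Dict Int Int} (h : pcSub pot pot') (k : Int)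
    (hk : pot.contains k = true) : pot'.getD k 0 = pot.getD k 0 := by
  rw [PySem.Dict.getD_eq_get?_getD, PySem.Dict.getD_eq_get?_getD, h k hk]

theorem pcSub_insert {pot : PySem.Dict Int Int} (v w : Int) (hc : pot.contains v = false) :
    pcSub pot (pot.insert v w) := by
  intro k hk
  exact PySem.Dict.get?_insert_of_ne _ _ (by rintro rfl; rw [hk] at hc; cases hc)

-- reading after writing, both indices in range
theorem pcGetSetD {α : Type} (xs : List α) (i j : Int) (v d : α) (h0 : 0 ≤ i)
    (hi : i < (xs.length : Int)) (h0j : 0 ≤ j) (hj : j < (xs.length : Int)) :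
    PySem.List.pyGetD (PySem.List.pySetD xs i v) j d =
      if j = i then v else PySem.List.pyGetD xs j d := by
  rw [PySem.List.pySetD_of_nonneg xs v h0,
    PySem.List.pyGetD_eq_getElem _ d h0j (by simpa using hj),
    List.getElem_set]
  by_cases hij : j = i
  · simp [hij]
  · rw [if_neg (by omega), if_neg hij, PySem.List.pyGetD_eq_getElem _ d h0j hj]

-- in-range read never raises
theorem pcPyGetSome {α : Type} (xs : List α) (i : Int) (d : α) (h0 : 0 ≤ i)
    (hi : i < (xs.length : Int)) :
    PySem.List.pyGet? xs i = some (PySem.List.pyGetD xs i d) := by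
  have hidx : PySem.List.pyIdx? xs.length i = some i.toNat := by
    simp [PySem.List.pyIdx?, h0, hi]
  have hlt : i.toNat < xs.length := by omega
  simp [PySem.List.pyGet?, PySem.List.pyGetD, hidx, List.getElem?_eq_getElem hlt]

theorem pcGoodSubset (infol : List (Int × List (Int × Int))) (pot : PySem.Dict Int Int)
    {S S' : List Int} (h : ∀ x, x ∈ S' → x ∈ S) (hg : pcGood infol pot S) :
    pcGood infol pot S' := fun u hu => hg u (h u hu)

theorem pcGoodTransfer (infol : List (Int × List (Int × Int)))
    {pot₂ pot' : PySem.Dict Int Int} (hsub : pcSub pot₂ pot') (S : List Int)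
    (hlab : ∀ u ∈ S, pot₂.contains u = true ∧
      ∀ vd ∈ pcLook infol u, pot₂.contains vd.1 = true) :
    pcGood infol pot₂ S ↔ pcGood infol pot' S := by
  unfold pcGood
  apply forall₂_congr
  intro u hu
  apply forall₂_congr
  intro vd hvd
  rw [pcSub_getD hsub u (hlab u hu).1, pcSub_getD hsub vd.1 ((hlab u hu).2 vd hvd)]

-- lockstep run of A's and B's inner edge loops
theorem pcEdges_lockstep (N : Int) (infol : List (Int × List (Int × Int))) :
    ∀ (es : List (Int × Int)) (u : Int) (pot : PySem.Dict Int Int) (info : List Int)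
      (check : List Bool) (stack : List Int),
    pcInv N pot info check → pcKeysIn N pot →
    (∀ x ∈ stack, pot.contains x = true) →
    pot.contains u = true →
    (∀ vd ∈ es, 1 ≤ vd.1 ∧ vd.1 ≤ N) →
    pcSub pot (pcEdgesB u pot stack es).1 ∧
    pcKeysIn N (pcEdgesB u pot stack es).1 ∧
    (∀ x ∈ (pcEdgesB u pot stack es).2, (pcEdgesB u pot stack es).1.contains x = true) ∧
    (∀ x, (pcEdgesB u pot stack es).1.contains x = true →
      pot.contains x = true ∨ x ∈ (pcEdgesB u pot stack es).2) ∧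
    (∀ x ∈ stack, x ∈ (pcEdgesB u pot stack es).2) ∧
    (∀ x ∈ (pcEdgesB u pot stack es).2, x ∈ stack ∨ pot.contains x = false) ∧
    (∀ vd ∈ es, (pcEdgesB u pot stack es).1.contains vd.1 = true) ∧
    (∃ info₂ check₂, pcInv N (pcEdgesB u pot stack es).1 info₂ check₂ ∧
      ((∀ vd ∈ es, (pcEdgesB u pot stack es).1.getD vd.1 0 =
          (pcEdgesB u pot stack es).1.getD u 0 + vd.2) →
        pcEdgesA u es info check stack =
          some (some (info₂, check₂, (pcEdgesB u pot stack es).2)))) ∧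
    (¬ (∀ vd ∈ es, (pcEdgesB u pot stack es).1.getD vd.1 0 =
        (pcEdgesB u pot stack es).1.getD u 0 + vd.2) →
      pcEdgesA u es info check stack = some none) := by
  intro es
  induction es with
  | nil =>
    intro u pot info check stack hInv hK hstack hu _
    simp only [pcEdgesB, pcEdgesA]
    exact ⟨pcSub_refl pot, hK, hstack, fun x hx => Or.inl hx, fun x hx => hx,
      fun x hx => Or.inl hx, by simp, ⟨info, check, hInv, fun _ => rfl⟩,
      fun hbad => absurd (by simp) hbad⟩
  | cons vd0 rest ih =>
    obtain ⟨v, d⟩ := vd0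
    intro u pot info check stack hInv hK hstack hu hbnd
    have hv1 : 1 ≤ v := (hbnd (v, d) List.mem_cons_self).1
    have hvN : v ≤ N := (hbnd (v, d) List.mem_cons_self).2
    have hu1 : 1 ≤ u := (hK u hu).1
    have huN : u ≤ N := (hK u hu).2
    obtain ⟨hlenI, hlenC, hIv⟩ := hInv
    have hclen : (check.length : Int) = N + 1 := by rw [hlenC]; omega
    have hilen : (info.length : Int) = N + 1 := by rw [hlenI]; omega
    have hget : PySem.List.pyGet? check v = some (PySem.List.pyGetD check v false) :=
      pcPyGetSome check v false (by omega) (by omega)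
    have hgv : PySem.List.pyGetD check v false = pot.contains v := (hIv v hv1 hvN).1
    have hinfo_u : PySem.List.pyGetD info u 0 = pot.getD u 0 := (hIv u hu1 huN).2 hu
    have hbnd' : ∀ vd ∈ rest, 1 ≤ vd.1 ∧ vd.1 ≤ N :=
      fun x hx => hbnd x (List.mem_cons_of_mem _ hx)
    cases hcv : pot.contains v with
    | false =>
      -- A flips check[v] and pushes; B inserts v
      set w : Int := pot.getD u 0 + d with hw
      set pot₁ := pot.insert v w with hpot₁
      set info₁ := PySem.List.pySetD info v (d + PySem.List.pyGetD info u 0) with hinfo₁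
      set check₁ := PySem.List.pySetD check v true with hcheck₁
      have hsub₁ : pcSub pot pot₁ := pcSub_insert v w hcv
      have huv : u ≠ v := by rintro rfl; rw [hu] at hcv; cases hcv
      have hInv₁ : pcInv N pot₁ info₁ check₁ := by
        refine ⟨by rw [hinfo₁, PySem.List.length_pySetD, hlenI],
          by rw [hcheck₁, PySem.List.length_pySetD, hlenC], ?_⟩
        intro x hx1 hxN
        have hxc : (x : Int) < (check.length : Int) := by omega
        have hxi : (x : Int) < (info.length : Int) := by omega
        rw [hcheck₁, pcGetSetD check v x true false (by omega) (by omega) (by omega) hxc]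
        rw [hinfo₁, pcGetSetD info v x _ 0 (by omega) (by omega) (by omega) hxi]
        rw [hpot₁, PySem.Dict.contains_insert, PySem.Dict.getD_insert]
        by_cases hxv : x = v
        · subst hxv
          constructor
          · simp
          · intro _
            simp [hinfo_u, hw, Int.add_comm]
        · have hbe : (x == v) = false := beq_eq_false_iff_ne.mpr hxv
          constructor
          · rw [if_neg hxv, hbe, Bool.false_or]
            exact (hIv x hx1 hxN).1
          · intro hcx
            rw [hbe, Bool.false_or] at hcx
            rw [if_neg hxv, if_neg hxv]
            exact (hIv x hx1 hxN).2 hcx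
      have hK₁ : pcKeysIn N pot₁ := by
        intro k hk
        rw [hpot₁, PySem.Dict.contains_insert] at hk
        rcases Bool.or_eq_true_iff.mp hk with h | h
        · have : k = v := by simpa using h
          subst this; exact ⟨hv1, hvN⟩
        · exact hK k h
      have hstack₁ : ∀ x ∈ v :: stack, pot₁.contains x = true := by
        intro x hx
        rcases List.mem_cons.mp hx with rfl | hx
        · exact PySem.Dict.contains_insert_self pot x w
        · exact pcSub_contains hsub₁ x (hstack x hx)
      have hu₁ : pot₁.contains u = true := pcSub_contains hsub₁ u hu
      obtain ⟨hSub₂, hK₂, hstlab₂, hcont₂, hstsub₂, hstfrom₂, htgt₂,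
        ⟨info₂, check₂, hInv₂, hAok⟩, hAneg⟩ :=
        ih u pot₁ info₁ check₁ (v :: stack) hInv₁ hK₁ hstack₁ hu₁ hbnd'
      have hBred : pcEdgesB u pot stack ((v, d) :: rest) = pcEdgesB u pot₁ (v :: stack) rest := by
        simp [pcEdgesB, hcv, hpot₁, hinfo₁, hw]
      have hAred : pcEdgesA u ((v, d) :: rest) info check stack =
          pcEdgesA u rest info₁ check₁ (v :: stack) := by
        rw [pcEdgesA.eq_def]
        simp only [hget, hgv, hcv]
        simp [hinfo₁, hcheck₁]
      rw [hBred, hAred]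
      have hv₁F : (pcEdgesB u pot₁ (v :: stack) rest).1.contains v = true :=
        pcSub_contains hSub₂ v (PySem.Dict.contains_insert_self pot v w)
      have hheadF : (pcEdgesB u pot₁ (v :: stack) rest).1.getD v 0 =
          (pcEdgesB u pot₁ (v :: stack) rest).1.getD u 0 + d := by
        rw [pcSub_getD hSub₂ v (PySem.Dict.contains_insert_self pot v w),
          pcSub_getD hSub₂ u hu₁, hpot₁, PySem.Dict.getD_insert, PySem.Dict.getD_insert]
        rw [if_pos rfl, if_neg huv]
      refine ⟨pcSub_trans hsub₁ hSub₂, hK₂, hstlab₂, ?_, ?_, ?_, ?_,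
        ⟨info₂, check₂, hInv₂, ?_⟩, ?_⟩
      · intro x hx
        rcases hcont₂ x hx with h | h
        · rw [hpot₁, PySem.Dict.contains_insert] at h
          rcases Bool.or_eq_true_iff.mp h with h | h
          · have hxv : x = v := by simpa using h
            subst hxv
            exact Or.inr (hstsub₂ x List.mem_cons_self)
          · exact Or.inl h
        · exact Or.inr h
      · exact fun x hx => hstsub₂ x (List.mem_cons_of_mem _ hx)
      · intro x hx
        rcases hstfrom₂ x hx with h | h
        · rcases List.mem_cons.mp h with rfl | h
          · exact Or.inr hcv
          · exact Or.inl h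
        · refine Or.inr ?_
          rw [hpot₁, PySem.Dict.contains_insert] at h
          exact (Bool.or_eq_false_iff.mp h).2
      · intro vd hvd
        rcases List.mem_cons.mp hvd with h | h
        · rw [h]; exact hv₁F
        · exact htgt₂ vd h
      · intro hok
        exact hAok fun vd hvd => hok vd (List.mem_cons_of_mem _ hvd)
      · intro hnok
        refine hAneg fun hrest => hnok ?_
        intro vd hvd
        rcases List.mem_cons.mp hvd with h | h
        · rw [h]; exact hheadF
        · exact hrest vd h
    | true =>
      -- v already labelled: A compares, B skips
      have hinfo_v : PySem.List.pyGetD info v 0 = pot.getD v 0 := (hIv v hv1 hvN).2 hcv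
      have hBred : pcEdgesB u pot stack ((v, d) :: rest) = pcEdgesB u pot stack rest := by
        simp [pcEdgesB, hcv]
      rw [hBred]
      by_cases heq : pot.getD v 0 = pot.getD u 0 + d
      · have hne : ¬ PySem.List.pyGetD info v 0 ≠ d + PySem.List.pyGetD info u 0 := by
          rw [hinfo_v, hinfo_u]; omega
        have hAred : pcEdgesA u ((v, d) :: rest) info check stack =
            pcEdgesA u rest info check stack := by
          rw [pcEdgesA.eq_def]
          simp only [hget, hgv, hcv]
          simp [hne]
        rw [hAred]
        obtain ⟨hSub₂, hK₂, hstlab₂, hcont₂, hstsub₂, hstfrom₂, htgt₂,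
          ⟨info₂, check₂, hInv₂, hAok⟩, hAneg⟩ :=
          ih u pot info check stack ⟨hlenI, hlenC, hIv⟩ hK hstack hu hbnd'
        have hheadF : (pcEdgesB u pot stack rest).1.getD v 0 =
            (pcEdgesB u pot stack rest).1.getD u 0 + d := by
          rw [pcSub_getD hSub₂ v hcv, pcSub_getD hSub₂ u hu]; exact heq
        refine ⟨hSub₂, hK₂, hstlab₂, hcont₂, hstsub₂, hstfrom₂, ?_,
          ⟨info₂, check₂, hInv₂, ?_⟩, ?_⟩
        · intro vd hvd
          rcases List.mem_cons.mp hvd with h | h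
          · rw [h]; exact pcSub_contains hSub₂ v hcv
          · exact htgt₂ vd h
        · intro hok
          exact hAok fun vd hvd => hok vd (List.mem_cons_of_mem _ hvd)
        · intro hnok
          refine hAneg fun hrest => hnok ?_
          intro vd hvd
          rcases List.mem_cons.mp hvd with h | h
          · rw [h]; exact hheadF
          · exact hrest vd h
      · -- genuine mismatch: A returns False here
        have hne : PySem.List.pyGetD info v 0 ≠ d + PySem.List.pyGetD info u 0 := by
          rw [hinfo_v, hinfo_u]; omega
        have hAnone : pcEdgesA u ((v, d) :: rest) info check stack = some none := by
          rw [pcEdgesA.eq_def]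
          simp only [hget, hgv, hcv]
          simp [hne]
        obtain ⟨hSub₂, hK₂, hstlab₂, hcont₂, hstsub₂, hstfrom₂, htgt₂,
          ⟨info₂, check₂, hInv₂, _⟩, _⟩ :=
          ih u pot info check stack ⟨hlenI, hlenC, hIv⟩ hK hstack hu hbnd'
        have hheadBad : (pcEdgesB u pot stack rest).1.getD v 0 ≠
            (pcEdgesB u pot stack rest).1.getD u 0 + d := by
          rw [pcSub_getD hSub₂ v hcv, pcSub_getD hSub₂ u hu]; exact heq
        refine ⟨hSub₂, hK₂, hstlab₂, hcont₂, hstsub₂, hstfrom₂, ?_,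
          ⟨info₂, check₂, hInv₂, fun hok => absurd (hok (v, d) List.mem_cons_self) hheadBad⟩,
          fun _ => hAnone⟩
        intro vd hvd
        rcases List.mem_cons.mp hvd with h | h
        · rw [h]; exact pcSub_contains hSub₂ v hcv
        · exact htgt₂ vd h


-- the counting form of Pre_people_check yields the pointwise form the lockstep proofs use
theorem pcPreBridge (N : Int) (infol : List (Int × List (Int × Int)))
    (hpre : Pre_people_check N infol) :
    ∀ u ∈ PySem.List.pyRange 1 (N + 1) 1,
      ((PySem.Dict.mk infol).get? u).isSome = true ∧
      ∀ vd ∈ ((PySem.Dict.mk infol).get? u).getD [], 1 ≤ vd.1 ∧ vd.1 ≤ N := by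
  obtain ⟨hcard, hbnd⟩ := hpre
  intro u hu
  have hub := PySem.List.mem_pyRange_one.mp hu
  have hnd : ((infol.map Prod.fst).dedup.filter
      (fun k => decide (1 ≤ k) && decide (k ≤ N))).Nodup :=
    (List.nodup_dedup _).filter _
  have hsub : ((infol.map Prod.fst).dedup.filter
      (fun k => decide (1 ≤ k) && decide (k ≤ N))).toFinset ⊆ Finset.Icc (1 : Int) N := by
    intro x hx
    rw [List.mem_toFinset, List.mem_filter] at hx
    simp only [Bool.and_eq_true, decide_eq_true_eq] at hx
    exact Finset.mem_Icc.mpr hx.2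
  have hcardIcc : (Finset.Icc (1 : Int) N).card = N.toNat := by
    rw [Int.card_Icc]
    omega
  have heq : ((infol.map Prod.fst).dedup.filter
      (fun k => decide (1 ≤ k) && decide (k ≤ N))).toFinset = Finset.Icc (1 : Int) N := by
    refine (Finset.eq_of_subset_of_card_le hsub ?_).symm.symm
    rw [List.toFinset_card_of_nodup hnd, hcardIcc]
    exact hcard
  have humem : u ∈ (infol.map Prod.fst).dedup.filter
      (fun k => decide (1 ≤ k) && decide (k ≤ N)) := by
    rw [← List.mem_toFinset, heq]
    exact Finset.mem_Icc.mpr ⟨hub.1, by omega⟩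
  refine ⟨?_, hbnd u humem⟩
  have hmemk : u ∈ infol.map Prod.fst :=
    List.mem_dedup.mp (List.mem_filter.mp humem).1
  obtain ⟨p, hp, hpu⟩ := List.mem_map.mp hmemk
  have hfind : (infol.find? (fun q => q.1 == u)).isSome :=
    List.find?_isSome.mpr ⟨p, hp, by simp [hpu]⟩
  simpa [PySem.Dict.get?] using hfind

-- lockstep run of A's and B's inner while loops
theorem pcInner_lockstep (N : Int) (infol : List (Int × List (Int × Int)))
    (hpre : ∀ u ∈ PySem.List.pyRange 1 (N + 1) 1,
      ((PySem.Dict.mk infol).get? u).isSome = true ∧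
      ∀ vd ∈ ((PySem.Dict.mk infol).get? u).getD [], 1 ≤ vd.1 ∧ vd.1 ≤ N) :
    ∀ (n : Nat) (pot : PySem.Dict Int Int) (info : List Int) (check : List Bool)
      (stack : List Int),
    pcMeasB infol pot stack ≤ n →
    pcInv N pot info check → pcKeysIn N pot →
    (∀ x ∈ stack, pot.contains x = true) →
    ∃ pot', pcInnerB infol pot stack = some pot' ∧ pcSub pot pot' ∧ pcKeysIn N pot' ∧
      (∀ u, (u ∈ stack ∨ (pot'.contains u = true ∧ pot.contains u = false)) →
        pot'.contains u = true ∧ ∀ vd ∈ pcLook infol u, pot'.contains vd.1 = true) ∧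
      (∃ infoW checkW, pcInv N pot' infoW checkW) ∧
      (pcGood infol pot' (stack ++ pot'.keys.filter (fun k => !pot.contains k)) →
        ∃ info' check', pcInnerA infol info check stack = some (some (info', check')) ∧
          pcInv N pot' info' check') ∧
      (¬ pcGood infol pot' (stack ++ pot'.keys.filter (fun k => !pot.contains k)) →
        pcInnerA infol info check stack = some none) := by
  intro n
  induction n using Nat.strong_induction_on with
  | _ n IH =>
    intro pot info check stack hm hInv hK hstack
    cases stack with
    | nil =>
      have hfe : ∀ x, x ∈ ([] : List Int) ++ pot.keys.filter (fun k => !pot.contains k) → False := by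
        intro x hx
        simp only [List.nil_append, List.mem_filter, Bool.not_eq_true'] at hx
        rw [← PySem.Dict.contains_iff_mem_keys] at hx
        rw [hx.1] at hx
        cases hx.2
      refine ⟨pot, by rw [pcInnerB.eq_def], pcSub_refl pot, hK, ?_, ⟨info, check, hInv⟩, ?_, ?_⟩
      · intro u hu
        rcases hu with h | ⟨h1, h2⟩
        · cases h
        · rw [h1] at h2; cases h2
      · intro _
        exact ⟨info, check, by rw [pcInnerA.eq_def], hInv⟩
      · intro hn
        exact absurd (fun x hx => absurd hx (fun h => (hfe x h).elim)) hn
    | cons u rest =>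
      have hulab : pot.contains u = true := hstack u List.mem_cons_self
      have hu1N := hK u hulab
      have humem : u ∈ PySem.List.pyRange 1 (N + 1) 1 :=
        PySem.List.mem_pyRange_one.mpr ⟨hu1N.1, by omega⟩
      obtain ⟨hsome, hbnd0⟩ := hpre u humem
      obtain ⟨es, hes⟩ := Option.isSome_iff_exists.mp hsome
      have hbnd : ∀ vd ∈ es, 1 ≤ vd.1 ∧ vd.1 ≤ N := by
        rw [hes] at hbnd0; simpa using hbnd0
      have hlook : pcLook infol u = es := by rw [pcLook, hes]; rfl
      obtain ⟨hSub₂, hK₂, hstlab₂, hcont₂, hstsub₂, hstfrom₂, htgt₂,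
        ⟨info₂, check₂, hInv₂, hAok⟩, hAneg⟩ :=
        pcEdges_lockstep N infol es u pot info check rest hInv hK
          (fun x hx => hstack x (List.mem_cons_of_mem _ hx)) hulab hbnd
      have hmeas : pcMeasB infol (pcEdgesB u pot rest es).1 (pcEdgesB u pot rest es).2 <
          pcMeasB infol pot (u :: rest) := by
        have := pcEdgesB_meas infol u es pot rest (pcMemTargets infol u es hes)
        simp only [pcMeasB] at this ⊢
        simp only [List.length_cons]
        omega
      obtain ⟨pot', hB', hSub', hK', hlab', hW', hGpos', hGneg'⟩ :=
        IH (pcMeasB infol (pcEdgesB u pot rest es).1 (pcEdgesB u pot rest es).2)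
          (lt_of_lt_of_le hmeas hm) (pcEdgesB u pot rest es).1 info₂ check₂
          (pcEdgesB u pot rest es).2 le_rfl hInv₂ hK₂ hstlab₂
      have hu₂ : (pcEdgesB u pot rest es).1.contains u = true := pcSub_contains hSub₂ u hulab
      have hBred : pcInnerB infol pot (u :: rest) =
          pcInnerB infol (pcEdgesB u pot rest es).1 (pcEdgesB u pot rest es).2 := by
        rw [pcInnerB]
        split
        · next heq => rw [hes] at heq; cases heq
        · next es' heq =>
            rw [hes] at heq
            injection heq with h
            rw [h]
      have hmem : ∀ x, x ∈ (u :: rest) ++ pot'.keys.filter (fun k => !pot.contains k) ↔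
          x = u ∨ x ∈ (pcEdgesB u pot rest es).2 ++
            pot'.keys.filter (fun k => !(pcEdgesB u pot rest es).1.contains k) := by
        intro x
        constructor
        · intro hx
          rcases List.mem_append.mp hx with hx | hx
          · rcases List.mem_cons.mp hx with rfl | hx
            · exact Or.inl rfl
            · exact Or.inr (List.mem_append.mpr (Or.inl (hstsub₂ x hx)))
          · rw [List.mem_filter, ← PySem.Dict.contains_iff_mem_keys,
              Bool.not_eq_true'] at hx
            cases hc₂ : (pcEdgesB u pot rest es).1.contains x with
            | true =>
              rcases hcont₂ x hc₂ with h | h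
              · rw [h] at hx; cases hx.2
              · exact Or.inr (List.mem_append.mpr (Or.inl h))
            | false =>
              refine Or.inr (List.mem_append.mpr (Or.inr ?_))
              rw [List.mem_filter, ← PySem.Dict.contains_iff_mem_keys, Bool.not_eq_true']
              exact ⟨hx.1, hc₂⟩
        · intro hx
          rcases hx with rfl | hx
          · exact List.mem_append.mpr (Or.inl List.mem_cons_self)
          · rcases List.mem_append.mp hx with hx | hx
            · rcases hstfrom₂ x hx with h | h
              · exact List.mem_append.mpr (Or.inl (List.mem_cons_of_mem _ h))
              · refine List.mem_append.mpr (Or.inr ?_)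
                rw [List.mem_filter, ← PySem.Dict.contains_iff_mem_keys, Bool.not_eq_true']
                exact ⟨pcSub_contains hSub' x (hstlab₂ x hx), h⟩
            · rw [List.mem_filter, ← PySem.Dict.contains_iff_mem_keys,
                Bool.not_eq_true'] at hx
              refine List.mem_append.mpr (Or.inr ?_)
              rw [List.mem_filter, ← PySem.Dict.contains_iff_mem_keys, Bool.not_eq_true']
              refine ⟨hx.1, ?_⟩
              cases hcp : pot.contains x with
              | false => rfl
              | true => rw [pcSub_contains hSub₂ x hcp] at hx; cases hx.2
      refine ⟨pot', by rw [hBred]; exact hB', pcSub_trans hSub₂ hSub', hK', ?_, hW', ?_, ?_⟩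
      · intro w hw
        have hcase : w ∈ (pcEdgesB u pot rest es).2 ∨
            ((pcEdgesB u pot rest es).1.contains w = true ∧
              (pcEdgesB u pot rest es).1.contains w = false) ∨ w = u ∨
            (pot'.contains w = true ∧ (pcEdgesB u pot rest es).1.contains w = false) := by
          rcases hw with hw | ⟨h1, h2⟩
          · rcases List.mem_cons.mp hw with rfl | hw
            · exact Or.inr (Or.inr (Or.inl rfl))
            · exact Or.inl (hstsub₂ w hw)
          · cases hc₂ : (pcEdgesB u pot rest es).1.contains w with
            | true =>
              rcases hcont₂ w hc₂ with h | h
              · rw [h] at h2; cases h2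
              · exact Or.inl h
            | false => exact Or.inr (Or.inr (Or.inr ⟨h1, rfl⟩))
        rcases hcase with h | ⟨h1, h2⟩ | rfl | h
        · exact hlab' w (Or.inl h)
        · rw [h1] at h2; cases h2
        · refine ⟨pcSub_contains hSub' w hu₂, ?_⟩
          rw [hlook]
          exact fun vd hvd => pcSub_contains hSub' vd.1 (htgt₂ vd hvd)
        · exact hlab' w (Or.inr h)
      · by_cases hok : ∀ vd ∈ es, (pcEdgesB u pot rest es).1.getD vd.1 0 =
            (pcEdgesB u pot rest es).1.getD u 0 + vd.2
        · intro hGood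
          have hAred : pcInnerA infol info check (u :: rest) =
              pcInnerA infol info₂ check₂ (pcEdgesB u pot rest es).2 := by
            rw [pcInnerA.eq_def]
            simp only [hes]
            split
            · next heq => rw [hAok hok] at heq; cases heq
            · next heq => rw [hAok hok] at heq; cases heq
            · next info' check' st' heq =>
                rw [hAok hok] at heq
                simp only [Option.some.injEq, Prod.mk.injEq] at heq
                rw [heq.1, heq.2.1, heq.2.2]
          have hG₂ : pcGood infol pot' ((pcEdgesB u pot rest es).2 ++
              pot'.keys.filter (fun k => !(pcEdgesB u pot rest es).1.contains k)) :=
            pcGoodSubset infol pot' (fun x hx => (hmem x).mpr (Or.inr hx)) hGood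
          obtain ⟨info', check', hA', hInv'⟩ := hGpos' hG₂
          exact ⟨info', check', by rw [hAred]; exact hA', hInv'⟩
        · intro hGood
          exfalso
          apply hok
          intro vd hvd
          have h1 := hGood u (List.mem_append.mpr (Or.inl List.mem_cons_self))
          rw [hlook] at h1
          have h2 := h1 vd hvd
          rw [pcSub_getD hSub' vd.1 (htgt₂ vd hvd), pcSub_getD hSub' u hu₂] at h2
          exact h2
      · by_cases hok : ∀ vd ∈ es, (pcEdgesB u pot rest es).1.getD vd.1 0 =
            (pcEdgesB u pot rest es).1.getD u 0 + vd.2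
        · intro hnG
          have hAred : pcInnerA infol info check (u :: rest) =
              pcInnerA infol info₂ check₂ (pcEdgesB u pot rest es).2 := by
            rw [pcInnerA.eq_def]
            simp only [hes]
            split
            · next heq => rw [hAok hok] at heq; cases heq
            · next heq => rw [hAok hok] at heq; cases heq
            · next info' check' st' heq =>
                rw [hAok hok] at heq
                simp only [Option.some.injEq, Prod.mk.injEq] at heq
                rw [heq.1, heq.2.1, heq.2.2]
          rw [hAred]
          refine hGneg' fun hg2 => hnG ?_
          intro x hx
          rcases (hmem x).mp hx with hxu | hx2
          · intro vd hvd
            rw [hxu] at hvd ⊢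
            rw [hlook] at hvd
            rw [pcSub_getD hSub' vd.1 (htgt₂ vd hvd), pcSub_getD hSub' u hu₂]
            exact hok vd hvd
          · exact hg2 x hx2
        · intro _
          rw [pcInnerA.eq_def]
          simp only [hes]
          split
          · next heq => rw [hAneg hok] at heq; cases heq
          · next heq => rfl
          · next info' check' st' heq => rw [hAneg hok] at heq; cases heq


theorem pcMemDecomp (pot pot₁ pot₂ pot' : PySem.Dict Int Int) (l0 : Int)
    (hpot₁ : pot₁ = pot.insert l0 0) (hcl : pot.contains l0 = false)
    (hl0₂ : pot₂.contains l0 = true) (hS12 : pcSub pot₁ pot₂) (hSub' : pcSub pot₂ pot') :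
    ∀ x, x ∈ pot'.keys.filter (fun k => !pot.contains k) ↔
      (x ∈ [l0] ++ pot₂.keys.filter (fun k => !pot₁.contains k)) ∨
      x ∈ pot'.keys.filter (fun k => !pot₂.contains k) := by
  have hS02 : pcSub pot pot₂ := pcSub_trans (hpot₁ ▸ pcSub_insert l0 0 hcl) hS12
  intro x
  constructor
  · intro hx
    rw [List.mem_filter, ← PySem.Dict.contains_iff_mem_keys, Bool.not_eq_true'] at hx
    cases hc₂ : pot₂.contains x with
    | true =>
      by_cases hxl : x = l0
      · exact Or.inl (List.mem_append.mpr (Or.inl (by rw [hxl]; exact List.mem_cons_self)))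
      · refine Or.inl (List.mem_append.mpr (Or.inr ?_))
        rw [List.mem_filter, ← PySem.Dict.contains_iff_mem_keys, Bool.not_eq_true']
        refine ⟨hc₂, ?_⟩
        rw [hpot₁, PySem.Dict.contains_insert, beq_eq_false_iff_ne.mpr hxl, Bool.false_or]
        exact hx.2
    | false =>
      refine Or.inr ?_
      rw [List.mem_filter, ← PySem.Dict.contains_iff_mem_keys, Bool.not_eq_true']
      exact ⟨hx.1, hc₂⟩
  · intro hx
    rw [List.mem_filter, ← PySem.Dict.contains_iff_mem_keys, Bool.not_eq_true']
    rcases hx with hx | hx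
    · rcases List.mem_append.mp hx with h1 | h1
      · have hxl : x = l0 := by simpa using h1
        subst hxl
        exact ⟨pcSub_contains hSub' x hl0₂, hcl⟩
      · rw [List.mem_filter, ← PySem.Dict.contains_iff_mem_keys, Bool.not_eq_true'] at h1
        refine ⟨pcSub_contains hSub' x h1.1, ?_⟩
        cases hcp : pot.contains x with
        | false => rfl
        | true =>
          exfalso
          have : pot₁.contains x = true := by
            rw [hpot₁, PySem.Dict.contains_insert, hcp, Bool.or_true]
          rw [this] at h1
          cases h1.2
    · rw [List.mem_filter, ← PySem.Dict.contains_iff_mem_keys, Bool.not_eq_true'] at hx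
      refine ⟨hx.1, ?_⟩
      cases hcp : pot.contains x with
      | false => rfl
      | true =>
        exfalso
        rw [pcSub_contains hS02 x hcp] at hx
        cases hx.2

-- lockstep run of the outer loops
theorem pcOuter_lockstep (N : Int) (infol : List (Int × List (Int × Int)))
    (hpre : ∀ u ∈ PySem.List.pyRange 1 (N + 1) 1,
      ((PySem.Dict.mk infol).get? u).isSome = true ∧
      ∀ vd ∈ ((PySem.Dict.mk infol).get? u).getD [], 1 ≤ vd.1 ∧ vd.1 ≤ N) :
    ∀ (l0s : List Int) (pot : PySem.Dict Int Int) (info : List Int) (check : List Bool),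
    pcInv N pot info check → pcKeysIn N pot →
    (∀ x ∈ l0s, 1 ≤ x ∧ x ≤ N) →
    ∃ pot', pcPhase1 infol l0s pot = some pot' ∧ pcSub pot pot' ∧ pcKeysIn N pot' ∧
      (∀ s ∈ l0s, pot'.contains s = true) ∧
      (∀ u, pot'.contains u = true → pot.contains u = true ∨
        ∀ vd ∈ pcLook infol u, pot'.contains vd.1 = true) ∧
      (pcGood infol pot' (pot'.keys.filter (fun k => !pot.contains k)) →
        pcOuterA infol l0s info check = some true) ∧
      (¬ pcGood infol pot' (pot'.keys.filter (fun k => !pot.contains k)) →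
        pcOuterA infol l0s info check = some false) := by
  intro l0s
  induction l0s with
  | nil =>
    intro pot info check hInv hK _
    have hfe : ∀ x, x ∈ pot.keys.filter (fun k => !pot.contains k) → False := by
      intro x hx
      rw [List.mem_filter, ← PySem.Dict.contains_iff_mem_keys, Bool.not_eq_true'] at hx
      rw [hx.1] at hx
      cases hx.2
    refine ⟨pot, by rw [pcPhase1], pcSub_refl pot, hK, by simp, fun u hu => Or.inl hu, ?_, ?_⟩
    · intro _
      rw [pcOuterA]
    · intro hn
      exact absurd (fun x hx => absurd hx (fun h => (hfe x h).elim)) hn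
  | cons l0 rest ihO =>
    intro pot info check hInv hK hbnd
    have hl0 : 1 ≤ l0 ∧ l0 ≤ N := hbnd l0 List.mem_cons_self
    have hbnd' : ∀ x ∈ rest, 1 ≤ x ∧ x ≤ N := fun x hx => hbnd x (List.mem_cons_of_mem _ hx)
    obtain ⟨hlenI, hlenC, hIv⟩ := hInv
    have hgl : PySem.List.pyGetD check l0 false = pot.contains l0 := (hIv l0 hl0.1 hl0.2).1
    cases hcl : pot.contains l0 with
    | true =>
      have hAred : pcOuterA infol (l0 :: rest) info check = pcOuterA infol rest info check := by
        rw [pcOuterA]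
        rw [if_neg (by rw [hgl, hcl]; simp)]
      have hBred : pcPhase1 infol (l0 :: rest) pot = pcPhase1 infol rest pot := by
        rw [pcPhase1]
        rw [if_neg (by rw [hcl]; simp)]
      obtain ⟨pot', hB', hSub', hK', hcont', hlab', hGpos', hGneg'⟩ :=
        ihO pot info check ⟨hlenI, hlenC, hIv⟩ hK hbnd'
      refine ⟨pot', by rw [hBred]; exact hB', hSub', hK', ?_, hlab', ?_, ?_⟩
      · intro s hs
        rcases List.mem_cons.mp hs with rfl | hs
        · exact pcSub_contains hSub' s hcl
        · exact hcont' s hs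
      · intro hG; rw [hAred]; exact hGpos' hG
      · intro hG; rw [hAred]; exact hGneg' hG
    | false =>
      have hclen : (check.length : Int) = N + 1 := by rw [hlenC]; omega
      have hilen : (info.length : Int) = N + 1 := by rw [hlenI]; omega
      set pot₁ := pot.insert l0 0 with hpot₁
      set info₁ := PySem.List.pySetD info l0 0 with hinfo₁
      set check₁ := PySem.List.pySetD check l0 true with hcheck₁
      have hsub₁ : pcSub pot pot₁ := hpot₁ ▸ pcSub_insert l0 0 hcl
      have hInv₁ : pcInv N pot₁ info₁ check₁ := by
        refine ⟨by rw [hinfo₁, PySem.List.length_pySetD, hlenI],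
          by rw [hcheck₁, PySem.List.length_pySetD, hlenC], ?_⟩
        intro x hx1 hxN
        rw [hcheck₁, pcGetSetD check l0 x true false (by omega) (by omega) (by omega) (by omega)]
        rw [hinfo₁, pcGetSetD info l0 x 0 0 (by omega) (by omega) (by omega) (by omega)]
        rw [hpot₁, PySem.Dict.contains_insert, PySem.Dict.getD_insert]
        by_cases hxv : x = l0
        · subst hxv
          constructor
          · simp
          · intro _; simp
        · have hbe : (x == l0) = false := beq_eq_false_iff_ne.mpr hxv
          constructor
          · rw [if_neg hxv, hbe, Bool.false_or]
            exact (hIv x hx1 hxN).1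
          · intro hcx
            rw [hbe, Bool.false_or] at hcx
            rw [if_neg hxv, if_neg hxv]
            exact (hIv x hx1 hxN).2 hcx
      have hK₁ : pcKeysIn N pot₁ := by
        intro k hk
        rw [hpot₁, PySem.Dict.contains_insert] at hk
        rcases Bool.or_eq_true_iff.mp hk with h | h
        · have hkv : k = l0 := by simpa using h
          subst hkv; exact hl0
        · exact hK k h
      obtain ⟨pot₂, hBin, hSub₂, hK₂, hlab₂, hW₂, hGpos₂, hGneg₂⟩ :=
        pcInner_lockstep N infol hpre (pcMeasB infol pot₁ [l0]) pot₁ info₁ check₁ [l0]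
          le_rfl hInv₁ hK₁ (by
            intro x hx
            rcases List.mem_cons.mp hx with rfl | hx
            · rw [hpot₁]; exact PySem.Dict.contains_insert_self pot x 0
            · cases hx)
      have hl0₂ : pot₂.contains l0 = true :=
        pcSub_contains hSub₂ l0 (by rw [hpot₁]; exact PySem.Dict.contains_insert_self pot l0 0)
      have hBred : pcPhase1 infol (l0 :: rest) pot = pcPhase1 infol rest pot₂ := by
        rw [pcPhase1]
        rw [if_pos hcl]
        rw [← hpot₁, hBin]
      have hlabS₂ : ∀ u ∈ [l0] ++ pot₂.keys.filter (fun k => !pot₁.contains k),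
          pot₂.contains u = true ∧ ∀ vd ∈ pcLook infol u, pot₂.contains vd.1 = true := by
        intro u hu
        rcases List.mem_append.mp hu with h | h
        · have hul : u = l0 := by simpa using h
          subst hul
          exact hlab₂ u (Or.inl List.mem_cons_self)
        · rw [List.mem_filter, ← PySem.Dict.contains_iff_mem_keys, Bool.not_eq_true'] at h
          exact hlab₂ u (Or.inr h)
      by_cases hG₂ : pcGood infol pot₂ ([l0] ++ pot₂.keys.filter (fun k => !pot₁.contains k))
      · obtain ⟨info₂, check₂, hAin, hInv₂⟩ := hGpos₂ hG₂
        have hAred : pcOuterA infol (l0 :: rest) info check =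
            pcOuterA infol rest info₂ check₂ := by
          rw [pcOuterA]
          rw [if_pos (by rw [hgl, hcl])]
          rw [← hinfo₁, ← hcheck₁, hAin]
        obtain ⟨pot', hBrest, hSub', hK', hcont', hlab', hGposR, hGnegR⟩ :=
          ihO pot₂ info₂ check₂ hInv₂ hK₂ hbnd'
        have hmem := pcMemDecomp pot pot₁ pot₂ pot' l0 hpot₁ hcl hl0₂ hSub₂ hSub'
        have hG₂' : pcGood infol pot' ([l0] ++ pot₂.keys.filter (fun k => !pot₁.contains k)) :=
          (pcGoodTransfer infol hSub' _ hlabS₂).mp hG₂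
        refine ⟨pot', by rw [hBred]; exact hBrest,
          pcSub_trans hsub₁ (pcSub_trans hSub₂ hSub'), hK', ?_, ?_, ?_, ?_⟩
        · intro s hs
          rcases List.mem_cons.mp hs with rfl | hs
          · exact pcSub_contains hSub' s hl0₂
          · exact hcont' s hs
        · intro u hu'
          cases hcp : pot.contains u with
          | true => exact Or.inl rfl
          | false =>
            refine Or.inr ?_
            by_cases hc₂ : pot₂.contains u = true
            · have hlabu : pot₂.contains u = true ∧
                  ∀ vd ∈ pcLook infol u, pot₂.contains vd.1 = true := by
                by_cases hxl : u = l0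
                · subst hxl; exact hlab₂ u (Or.inl List.mem_cons_self)
                · refine hlab₂ u (Or.inr ⟨hc₂, ?_⟩)
                  rw [hpot₁, PySem.Dict.contains_insert,
                    beq_eq_false_iff_ne.mpr hxl, Bool.false_or]
                  exact hcp
              exact fun vd hvd => pcSub_contains hSub' vd.1 (hlabu.2 vd hvd)
            · rcases hlab' u hu' with h | h
              · exact absurd h hc₂
              · exact h
        · intro hG
          rw [hAred]
          exact hGposR (pcGoodSubset infol pot' (fun x hx => (hmem x).mpr (Or.inr hx)) hG)
        · intro hnG
          rw [hAred]
          refine hGnegR fun hGrest => hnG ?_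
          intro x hx
          rcases (hmem x).mp hx with h | h
          · exact hG₂' x h
          · exact hGrest x h
      · have hAinNone := hGneg₂ hG₂
        have hAred : pcOuterA infol (l0 :: rest) info check = some false := by
          rw [pcOuterA]
          rw [if_pos (by rw [hgl, hcl])]
          rw [← hinfo₁, ← hcheck₁, hAinNone]
        obtain ⟨infoW, checkW, hInvW⟩ := hW₂
        obtain ⟨pot', hBrest, hSub', hK', hcont', hlab', hGposR, hGnegR⟩ :=
          ihO pot₂ infoW checkW hInvW hK₂ hbnd'
        have hmem := pcMemDecomp pot pot₁ pot₂ pot' l0 hpot₁ hcl hl0₂ hSub₂ hSub'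
        have hnGS : ¬ pcGood infol pot' (pot'.keys.filter (fun k => !pot.contains k)) := by
          intro hG
          apply hG₂
          refine (pcGoodTransfer infol hSub' _ hlabS₂).mpr ?_
          exact pcGoodSubset infol pot' (fun x hx => (hmem x).mpr (Or.inl hx)) hG
        refine ⟨pot', by rw [hBred]; exact hBrest,
          pcSub_trans hsub₁ (pcSub_trans hSub₂ hSub'), hK', ?_, ?_, ?_, ?_⟩
        · intro s hs
          rcases List.mem_cons.mp hs with rfl | hs
          · exact pcSub_contains hSub' s hl0₂
          · exact hcont' s hs
        · intro u hu'
          cases hcp : pot.contains u with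
          | true => exact Or.inl rfl
          | false =>
            refine Or.inr ?_
            by_cases hc₂ : pot₂.contains u = true
            · have hlabu : pot₂.contains u = true ∧
                  ∀ vd ∈ pcLook infol u, pot₂.contains vd.1 = true := by
                by_cases hxl : u = l0
                · subst hxl; exact hlab₂ u (Or.inl List.mem_cons_self)
                · refine hlab₂ u (Or.inr ⟨hc₂, ?_⟩)
                  rw [hpot₁, PySem.Dict.contains_insert,
                    beq_eq_false_iff_ne.mpr hxl, Bool.false_or]
                  exact hcp
              exact fun vd hvd => pcSub_contains hSub' vd.1 (hlabu.2 vd hvd)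
            · rcases hlab' u hu' with h | h
              · exact absurd h hc₂
              · exact h
        · intro hG
          exact absurd hG hnGS
        · intro _
          exact hAred


-- ===== VERDICT (by name: the statement is the Claim_ definition above) =====
theorem people_check_spec : Claim_equal_people_check := by
  unfold Claim_equal_people_check
  intro N infol _ hpre
  unfold Spec_people_check
  have hInv0 : pcInv N PySem.Dict.empty (List.replicate (N + 1).toNat 0)
      (List.replicate (N + 1).toNat false) := by
    refine ⟨by simp, by simp, ?_⟩
    intro v h1 hN
    have hlen : ((List.replicate (N + 1).toNat false).length : Int) = N + 1 := by
      simp; omega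
    constructor
    · rw [PySem.List.pyGetD_eq_getElem _ false (by omega) (by rw [hlen]; omega)]
      rw [List.getElem_replicate]
      rw [PySem.Dict.contains_empty]
    · intro hc
      rw [PySem.Dict.contains_empty] at hc
      cases hc
  have hK0 : pcKeysIn N PySem.Dict.empty := by
    intro k hk
    rw [PySem.Dict.contains_empty] at hk
    cases hk
  have hbnd0 : ∀ x ∈ PySem.List.pyRange 1 (N + 1) 1, 1 ≤ x ∧ x ≤ N := by
    intro x hx
    have := PySem.List.mem_pyRange_one.mp hx
    omega
  obtain ⟨pot', hB, hSub, hK', hcontAll, hlabAll, hGpos, hGneg⟩ :=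
    pcOuter_lockstep N infol (pcPreBridge N infol hpre)
      (PySem.List.pyRange 1 (N + 1) 1) PySem.Dict.empty
      (List.replicate (N + 1).toNat 0) (List.replicate (N + 1).toNat false) hInv0 hK0 hbnd0
  have hGiff : ((PySem.List.pyRange 1 (N + 1) 1).all fun u =>
      (((PySem.Dict.mk infol).get? u).getD []).all fun vd =>
        pot'.getD vd.1 0 == pot'.getD u 0 + vd.2) = true ↔
      pcGood infol pot' (pot'.keys.filter (fun k => !(PySem.Dict.empty : PySem.Dict Int Int).contains k)) := by
    have hmemEq : ∀ x, x ∈ pot'.keys.filter (fun k => !(PySem.Dict.empty : PySem.Dict Int Int).contains k) ↔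
        x ∈ PySem.List.pyRange 1 (N + 1) 1 := by
      intro x
      rw [List.mem_filter, ← PySem.Dict.contains_iff_mem_keys]
      simp only [PySem.Dict.contains_empty, Bool.not_false, and_true]
      constructor
      · intro h
        exact PySem.List.mem_pyRange_one.mpr ⟨(hK' x h).1, by have := (hK' x h).2; omega⟩
      · intro h
        exact hcontAll x h
    rw [List.all_eq_true]
    constructor
    · intro hall u hu
      have h2 := hall u ((hmemEq u).mp hu)
      rw [List.all_eq_true] at h2
      intro vd hvd
      exact beq_iff_eq.mp (h2 vd hvd)
    · intro hg u hu
      rw [List.all_eq_true]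
      intro vd hvd
      exact beq_iff_eq.mpr (hg u ((hmemEq u).mpr hu) vd hvd)
  have hBalt : people_check_alt N infol = ((PySem.List.pyRange 1 (N + 1) 1).all fun u =>
      (((PySem.Dict.mk infol).get? u).getD []).all fun vd =>
        pot'.getD vd.1 0 == pot'.getD u 0 + vd.2) := by
    unfold people_check_alt
    rw [hB]
  unfold people_check
  rw [hBalt]
  by_cases hG : pcGood infol pot' (pot'.keys.filter (fun k => !(PySem.Dict.empty : PySem.Dict Int Int).contains k))
  · rw [hGpos hG]
    exact (hGiff.mpr hG).symm
  · rw [hGneg hG]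
    cases hall : ((PySem.List.pyRange 1 (N + 1) 1).all fun u =>
        (((PySem.Dict.mk infol).get? u).getD []).all fun vd =>
          pot'.getD vd.1 0 == pot'.getD u 0 + vd.2) with
    | false => rfl
    | true => exact absurd (hGiff.mp hall) hG
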